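-- pv_equiv track=rewrite | github.com/osj3474/Algorithm-Practice | Practice/Kakao/kakao3.py | makeIdx
-- ===== SOURCE A (Python) =====
-- def makeIdx(N):
--     idx_lst = list()
--     for i in range(N):
--         temp_lst = [0] * N
--         for j in range(N):
--             temp_lst[j] = i + N * (N - j - 1)
--         idx_lst += temp_lst
--     return idx_lst
-- ===== SOURCE B (Python) =====
-- def makeIdx(N):
--     if N <= 0:
--         return []
--     row = list(range(N * (N - 1), -1, -N))
--     out = []
--     for _ in range(N):
--         out.extend(row)
--         row = [v + 1 for v in row]
--     return out
-- ===== Notes on version B (the rewrite author's own statement) =====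
-- stated objective: alternative
-- what changed: B computes only the first row as a countdown range and then derives each subsequent row from the previous one by incrementing every element by 1 (row-to-row DP with an evolving row accumulator), instead of A's filling a fresh preallocated [0]*N row cell-by-cell with the formula i + N*(N-j-1) for every row.
import Mathlib
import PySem

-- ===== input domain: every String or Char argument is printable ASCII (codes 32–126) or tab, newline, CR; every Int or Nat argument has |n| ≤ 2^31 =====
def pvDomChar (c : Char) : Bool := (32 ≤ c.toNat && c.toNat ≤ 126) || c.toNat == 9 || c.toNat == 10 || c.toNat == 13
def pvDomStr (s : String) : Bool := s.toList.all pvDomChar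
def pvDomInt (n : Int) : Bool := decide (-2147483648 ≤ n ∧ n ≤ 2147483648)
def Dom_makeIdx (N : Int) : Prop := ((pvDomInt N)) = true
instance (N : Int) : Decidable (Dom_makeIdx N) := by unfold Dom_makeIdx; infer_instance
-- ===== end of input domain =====

-- B computes only the first row (as a countdown range) and derives each following row from the
-- previous one by adding 1 to every element (row-to-row DP), instead of A's per-cell formula
-- fill of a fresh preallocated [0]*N row (objective: alternative decomposition, same cost).
-- Both ports keep their Python-list accumulators as Lean Arrays (Python lists are dynamic
-- arrays); indices come from range(N), hence nonnegative, so `.toNat` on them is exact.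

-- ===== PORT A =====
def makeIdx (N : Int) : List Int :=
  ((PySem.List.pyRange 0 N 1).foldl (fun (idx_lst : Array Int) i =>
    let temp0 : Array Int := Array.replicate N.toNat 0   -- [0] * N
    let temp := (PySem.List.pyRange 0 N 1).foldl
      (fun t j => t.setIfInBounds j.toNat (i + N * (N - j - 1))) temp0
    idx_lst ++ temp) #[]).toList

-- ===== PORT B =====
def makeIdx_alt (N : Int) : List Int :=
  if N ≤ 0 then []
  else
    let row0 : List Int := PySem.List.pyRange (N * (N - 1)) (-1) (-N)
    (((PySem.List.pyRange 0 N 1).foldl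
      (fun (s : Array Int × List Int) _ => (s.1 ++ s.2, s.2.map (fun v => v + 1)))
      (#[], row0)).1).toList

-- ===== PRECONDITION & SPEC =====
def Spec_makeIdx (N : Int) (out : List Int) : Prop := out = makeIdx_alt N
instance (N : Int) (out : List Int) : Decidable (Spec_makeIdx N out) := by unfold Spec_makeIdx; infer_instance

-- ===== CLAIM =====
def Claim_equal_makeIdx : Prop := ∀ (N : Int), Dom_makeIdx N → Spec_makeIdx N (makeIdx N)

-- ===== LEMMAS AND PROOFS =====

-- A's inner loop 'for j in range(a, len(xs)): xs[j] = f(j)' rewrites the tail of xs to map f.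
theorem pv_setloop (f : Int → Int) : ∀ (m : Nat) (a : Int) (xs : List Int),
    0 ≤ a → a.toNat + m = xs.length →
    (PySem.List.pyRange a xs.length 1).foldl (fun t j => PySem.List.pySetD t j (f j)) xs
      = xs.take a.toNat ++ (List.range m).map (fun (k : Nat) => f (a + (k : Int))) := by
  intro m
  induction m with
  | zero =>
      intro a xs ha hlen
      rw [PySem.List.pyRange_one_eq_nil (by omega)]
      simp
      omega
  | succ m ih =>
      intro a xs ha hlen
      have hlt : a < (xs.length : Int) := by omega
      rw [PySem.List.pyRange_one_cons hlt]
      simp only [List.foldl_cons]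
      have hset : PySem.List.pySetD xs a (f a) = xs.set a.toNat (f a) :=
        PySem.List.pySetD_of_nonneg xs (f a) ha
      have hlen' : (xs.set a.toNat (f a)).length = xs.length := by simp
      have := ih (a + 1) (xs.set a.toNat (f a)) (by omega) (by simp; omega)
      rw [hlen'] at this
      rw [hset, this]
      have htn : (a + 1).toNat = a.toNat + 1 := by omega
      rw [htn]
      have htake : (xs.set a.toNat (f a)).take (a.toNat + 1)
          = xs.take a.toNat ++ [f a] := by
        rw [List.set_eq_take_append_cons_drop, if_pos (by omega : a.toNat < xs.length)]
        rw [show a.toNat + 1 = (xs.take a.toNat).length + 1 by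
          simp [Nat.min_eq_left (by omega : a.toNat ≤ xs.length)]]
        rw [List.take_append]
        simp
      rw [htake, List.append_assoc]
      congr 1
      rw [List.range_succ_eq_map, List.map_cons, List.map_map]
      simp only [List.singleton_append, Nat.cast_zero, add_zero]
      congr 1
      apply List.map_congr_left
      intro k _
      simp only [Function.comp]
      congr 1
      push_cast
      ring

-- Array-state inner fold = list-state inner fold, through toList (all indices nonnegative).
theorem pv_arr_inner (g : Int → Int) : ∀ (l : List Int) (t : Array Int), (∀ j ∈ l, 0 ≤ j) →
    (l.foldl (fun t j => t.setIfInBounds j.toNat (g j)) t).toList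
      = l.foldl (fun xs j => PySem.List.pySetD xs j (g j)) t.toList := by
  intro l
  induction l with
  | nil => intro t _; rfl
  | cons a l ih =>
      intro t h
      simp only [List.foldl_cons]
      rw [ih _ (fun j hj => h j (List.mem_cons_of_mem _ hj))]
      congr 1
      rw [Array.toList_setIfInBounds,
        PySem.List.pySetD_of_nonneg t.toList (g a) (h a List.mem_cons_self)]

-- Array-accumulator outer fold = list-accumulator outer fold, through toList.
theorem pv_arr_outer (g : Int → Array Int) (g' : Int → List Int)
    (hg : ∀ i, (g i).toList = g' i) : ∀ (l : List Int) (acc : Array Int),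
    (l.foldl (fun a i => a ++ g i) acc).toList
      = l.foldl (fun xs i => xs ++ g' i) acc.toList := by
  intro l
  induction l with
  | nil => intro acc; rfl
  | cons a l ih =>
      intro acc
      simp only [List.foldl_cons]
      rw [ih, Array.toList_append, hg]

-- B's pair fold with an Array first component = the same fold with a list first component.
theorem pv_pair_arr : ∀ (l : List Int) (out : Array Int) (row : List Int),
    ((l.foldl (fun (s : Array Int × List Int) _ => (s.1 ++ s.2, s.2.map (fun v => v + 1)))
        (out, row)).1).toList
      = (l.foldl (fun (s : List Int × List Int) _ => (s.1 ++ s.2, s.2.map (fun v => v + 1)))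
        (out.toList, row)).1 := by
  intro l
  induction l with
  | nil => intro out row; rfl
  | cons a l ih =>
      intro out row
      simp only [List.foldl_cons]
      rw [ih, Array.toList_appendList]

-- B's outer loop: folding the pair (out, row) over any list of length m accumulates the
-- shifted copies row+0, row+1, …, row+(m-1).
theorem pv_pairfold : ∀ (l : List Int) (out row : List Int),
    ((l.foldl (fun (s : List Int × List Int) _ => (s.1 ++ s.2, s.2.map (fun v => v + 1)))
      (out, row)).1)
      = out ++ (List.range l.length).flatMap (fun (t : Nat) => row.map (fun v => v + (t : Int))) := by
  intro l
  induction l with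
  | nil => simp
  | cons a l ih =>
      intro out row
      simp only [List.foldl_cons]
      rw [ih]
      rw [List.length_cons, List.range_succ_eq_map, List.flatMap_cons, List.flatMap_map,
          List.append_assoc]
      congr 1
      congr 1
      · simp
      · simp only [Function.comp_def, List.map_map]
        apply List.flatMap_congr
        intro t _
        apply List.map_congr_left
        intro v _
        push_cast
        ring

-- ===== VERDICT =====
theorem makeIdx_spec : Claim_equal_makeIdx := by
  intro N _
  unfold Spec_makeIdx makeIdx makeIdx_alt
  by_cases hN : N ≤ 0
  · rw [if_pos hN, PySem.List.pyRange_one_eq_nil (by omega)]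
    simp
  · rw [if_neg hN]
    have hN' : 0 < N := by omega
    set n := N.toNat with hn
    have hNn : (n : Int) = N := by omega
    -- A side, step 1: drop the Arrays via toList
    have hAarr := pv_arr_outer
      (fun i => (PySem.List.pyRange 0 N 1).foldl
        (fun t j => t.setIfInBounds j.toNat (i + N * (N - j - 1))) (Array.replicate n 0))
      (fun i => (PySem.List.pyRange 0 N 1).foldl
        (fun xs j => PySem.List.pySetD xs j (i + N * (N - j - 1))) (List.replicate n 0))
      (fun i => by
        rw [pv_arr_inner _ _ _ (fun j hj => ((PySem.List.mem_pyRange_one).1 hj).1),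
          Array.toList_replicate])
      (PySem.List.pyRange 0 N 1) #[]
    rw [hAarr]
    -- A side, step 2: each row is a map over List.range n
    have hrowA : ∀ i : Int,
        (PySem.List.pyRange 0 N 1).foldl
            (fun xs j => PySem.List.pySetD xs j (i + N * (N - j - 1)))
            (List.replicate n 0)
          = (List.range n).map (fun (k : Nat) => i + N * (N - (k : Int) - 1)) := by
      intro i
      have hL := pv_setloop (fun j => i + N * (N - j - 1)) n 0
          (List.replicate n 0) le_rfl (by simp)
      rw [show ((List.replicate n (0:Int)).length : Int) = N by simp [hNn]] at hL
      rw [hL]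
      simp only [Int.toNat_zero, List.take_zero, List.nil_append]
      apply List.map_congr_left
      intro k _
      ring
    have hA : (PySem.List.pyRange 0 N 1).foldl (fun idx_lst i =>
        idx_lst ++ (PySem.List.pyRange 0 N 1).foldl
          (fun xs j => PySem.List.pySetD xs j (i + N * (N - j - 1)))
          (List.replicate n 0)) ((#[] : Array Int).toList)
        = (PySem.List.pyRange 0 N 1).flatMap
            (fun i => (List.range n).map (fun (k : Nat) => i + N * (N - (k : Int) - 1))) := by
      rw [show (fun (idx_lst : List Int) (i : Int) =>
          idx_lst ++ (PySem.List.pyRange 0 N 1).foldl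
            (fun xs j => PySem.List.pySetD xs j (i + N * (N - j - 1)))
            (List.replicate n 0))
        = (fun idx_lst i => idx_lst ++
            (List.range n).map (fun (k : Nat) => i + N * (N - (k : Int) - 1))) from
          funext fun idx_lst => funext fun i => by rw [hrowA i]]
      rw [PySem.List.foldl_append_eq_flatMap]
      simp
    -- B side: row0 as a map over List.range n
    have hrow0 : PySem.List.pyRange (N * (N - 1)) (-1) (-N)
        = (List.range n).map (fun (k : Nat) => N * (N - 1) + (-N) * (k : Int)) := by
      rw [PySem.List.pyRange_of_neg _ _ (by omega : -N < 0)]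
      have hcnt : (if (-1 : Int) < N * (N - 1)
          then ((N * (N - 1) - (-1) + - -N - 1) / - -N).toNat else 0) = n := by
        rw [if_pos (by nlinarith [hN'] : (-1 : Int) < N * (N - 1))]
        have h1 : N * (N - 1) - (-1) + - -N - 1 = N * N := by ring
        rw [h1, Int.neg_neg, Int.mul_ediv_cancel _ (by omega : N ≠ 0)]
      rw [hcnt]
    rw [hA, pv_pair_arr, pv_pairfold]
    rw [hrow0, PySem.List.length_pyRange_one, Array.toList_empty, List.nil_append]
    rw [PySem.List.pyRange_one, show (N - 0).toNat = n by omega]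
    rw [List.flatMap_map]
    simp only [Function.comp_def, List.map_map]
    apply List.flatMap_congr
    intro t _
    apply List.map_congr_left
    intro k _
    ring
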